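-- pv_equiv track=rewrite | github.com/hbarakatCEGID/Product-Builders | src/product_builders/profiles/base.py | filter_blocked_commands
-- ===== SOURCE A (Python) =====
-- _TOOL_SPECIFIC_COMMANDS: dict[str, frozenset[str]] = {
--     "prisma:migrate": frozenset({"prisma", "@prisma/client"}),
--     "prisma:db push": frozenset({"prisma", "@prisma/client"}),
--     "alembic upgrade": frozenset({"alembic", "sqlalchemy"}),
--     "alembic downgrade": frozenset({"alembic", "sqlalchemy"}),
--     "flyway migrate": frozenset({"flyway"}),
--     "docker build": frozenset({"docker"}),
--     "docker push": frozenset({"docker"}),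
-- }
--
-- def filter_blocked_commands(
--     commands: list[str], detected_deps: set[str]
-- ) -> list[str]:
--     """Remove tool-specific blocked commands when the tool isn't in the project.
--
--     Universal safety commands (rm -rf, git push --force, npm publish, etc.)
--     are always kept.  Tool-specific commands (prisma:migrate, alembic upgrade)
--     are only kept when a related dependency is detected.
--
--     If *detected_deps* is empty, all commands are kept (safe default).
--     """
--     if not detected_deps:
--         return list(commands)
--
--     result: list[str] = []
--     for cmd in commands:
--         required = _TOOL_SPECIFIC_COMMANDS.get(cmd)
--         if required is None:
--             # Universal command -- always keep
--             result.append(cmd)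
--         elif required & detected_deps:
--             # Tool-specific and tool IS present -- keep
--             result.append(cmd)
--         # else: tool-specific and tool NOT present -- skip
--     return result
-- ===== SOURCE B (Python) =====
-- # Tool groups: each (required deps, the commands gated by them).
-- _TOOL_GROUPS = [
--     (frozenset({"prisma", "@prisma/client"}), ("prisma:migrate", "prisma:db push")),
--     (frozenset({"alembic", "sqlalchemy"}), ("alembic upgrade", "alembic downgrade")),
--     (frozenset({"flyway"}), ("flyway migrate",)),
--     (frozenset({"docker"}), ("docker build", "docker push")),
-- ]
--
-- def filter_blocked_commands(commands, detected_deps):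
--     if not detected_deps:
--         return list(commands)
--     result = list(commands)
--     for deps, cmds in _TOOL_GROUPS:
--         if deps.isdisjoint(detected_deps):
--             result = [c for c in result if c not in cmds]
--     return result
-- ===== Notes on version B (the rewrite author's own statement) =====
-- stated objective: alternative
-- what changed: B iterates over the four tool groups instead of the commands: for each group whose required deps are all absent it strips that group's commands from the list in a staged pass, replacing A's per-command dict lookup and set intersection.
import Mathlib
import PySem

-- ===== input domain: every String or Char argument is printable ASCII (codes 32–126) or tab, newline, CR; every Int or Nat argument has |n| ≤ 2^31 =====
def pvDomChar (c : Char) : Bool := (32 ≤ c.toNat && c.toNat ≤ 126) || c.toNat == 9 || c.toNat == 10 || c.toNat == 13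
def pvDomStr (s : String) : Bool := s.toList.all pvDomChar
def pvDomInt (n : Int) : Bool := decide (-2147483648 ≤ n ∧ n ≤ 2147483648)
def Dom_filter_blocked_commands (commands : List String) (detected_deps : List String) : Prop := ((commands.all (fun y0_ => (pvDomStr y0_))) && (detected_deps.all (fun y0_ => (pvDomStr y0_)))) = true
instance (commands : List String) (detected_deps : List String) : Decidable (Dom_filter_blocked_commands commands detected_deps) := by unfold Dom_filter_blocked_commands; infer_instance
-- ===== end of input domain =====

-- B iterates over the four tool groups, stripping each absent group's commands in staged passes,
-- instead of A's single pass with a per-command dict lookup; same O(n) cost, different traversal.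

-- ===== PORT A =====
def pvTable : PySem.Dict String (List String) := PySem.Dict.mk
  [ ("prisma:migrate", ["prisma", "@prisma/client"])
  , ("prisma:db push", ["prisma", "@prisma/client"])
  , ("alembic upgrade", ["alembic", "sqlalchemy"])
  , ("alembic downgrade", ["alembic", "sqlalchemy"])
  , ("flyway migrate", ["flyway"])
  , ("docker build", ["docker"])
  , ("docker push", ["docker"]) ]

def filter_blocked_commands (commands : List String) (detected_deps : List String) : List String :=
  if detected_deps.isEmpty then commands
  else
    commands.foldl (fun result cmd =>
      match pvTable.get? cmd with
      | none => result ++ [cmd]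
      | some required =>
        if required.any (fun d => detected_deps.contains d) then result ++ [cmd]
        else result) []

-- ===== PORT B =====
def pvGroups : List (List String × List String) :=
  [ (["prisma", "@prisma/client"], ["prisma:migrate", "prisma:db push"])
  , (["alembic", "sqlalchemy"], ["alembic upgrade", "alembic downgrade"])
  , (["flyway"], ["flyway migrate"])
  , (["docker"], ["docker build", "docker push"]) ]

def filter_blocked_commands_alt (commands : List String) (detected_deps : List String) : List String :=
  if detected_deps.isEmpty then commands
  else
    pvGroups.foldl (fun result g =>
      if !(g.1.any (fun d => detected_deps.contains d)) then
        result.filter (fun c => !(g.2.contains c))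
      else result) commands

-- ===== PRECONDITION & SPEC =====
def Spec_filter_blocked_commands (commands : List String) (detected_deps : List String) (out : List String) : Prop := out = filter_blocked_commands_alt commands detected_deps
instance (commands : List String) (detected_deps : List String) (out : List String) : Decidable (Spec_filter_blocked_commands commands detected_deps out) := by unfold Spec_filter_blocked_commands; infer_instance

-- ===== CLAIM (what is proved, stated in full; the proofs are below) =====
def Claim_equal_filter_blocked_commands : Prop := ∀ (commands : List String) (detected_deps : List String), Dom_filter_blocked_commands commands detected_deps → Spec_filter_blocked_commands commands detected_deps (filter_blocked_commands commands detected_deps)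

-- ===== LEMMAS AND PROOFS =====

-- A's per-command keep decision
def pvKeepA (deps : List String) (c : String) : Bool :=
  match pvTable.get? c with
  | none => true
  | some required => required.any (fun d => deps.contains d)

-- B's final keep decision: survive every group pass
def pvKeepB (deps : List String) (c : String) : Bool :=
  pvGroups.all (fun g => g.1.any (fun d => deps.contains d) || !(g.2.contains c))

theorem pv_foldA_eq (deps : List String) :
    ∀ (l acc : List String),
      l.foldl (fun result cmd =>
        match pvTable.get? cmd with
        | none => result ++ [cmd]
        | some required =>
          if required.any (fun d => deps.contains d) then result ++ [cmd]
          else result) acc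
      = acc ++ l.filter (pvKeepA deps) := by
  intro l
  induction l with
  | nil => intro acc; simp
  | cons x xs ih =>
    intro acc
    simp only [List.foldl_cons, List.filter_cons]
    cases hm : pvTable.get? x with
    | none =>
      simp only [pvKeepA, hm]
      rw [ih]; simp
    | some required =>
      simp only [pvKeepA, hm]
      cases ha : required.any (fun d => deps.contains d) with
      | true => rw [ih]; simp
      | false => rw [ih]; simp

theorem pv_foldB_eq (deps : List String) :
    ∀ (gs : List (List String × List String)) (start : List String),
      gs.foldl (fun result g =>
        if !(g.1.any (fun d => deps.contains d)) then
          result.filter (fun c => !(g.2.contains c))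
        else result) start
      = start.filter (fun c => gs.all (fun g => g.1.any (fun d => deps.contains d) || !(g.2.contains c))) := by
  intro gs
  induction gs with
  | nil => intro start; simp
  | cons g gs ih =>
    intro start
    simp only [List.foldl_cons]
    cases ha : g.1.any (fun d => deps.contains d) with
    | true =>
      have ha' : (g.1.any fun d => decide (d ∈ deps)) = true := by simpa using ha
      rw [ih]
      simp only [Bool.not_true, Bool.false_eq_true, if_false]
      apply List.filter_congr
      intro c _
      simp [List.all_cons, ha']
    | false =>
      have ha' : (g.1.any fun d => decide (d ∈ deps)) = false := by simpa using ha
      simp only [Bool.not_false, if_true]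
      rw [ih, List.filter_filter]
      apply List.filter_congr
      intro c _
      simp [List.all_cons, ha', Bool.and_comm]

-- pointwise: A's keep decision equals B's group-survival decision
theorem pv_keep_eq (deps : List String) (c : String) :
    pvKeepA deps c = pvKeepB deps c := by
  by_cases h1 : c = "prisma:migrate"
  · subst h1; simp [pvKeepA, pvKeepB, pvTable, pvGroups, PySem.Dict.get?]
  by_cases h2 : c = "prisma:db push"
  · subst h2; simp [pvKeepA, pvKeepB, pvTable, pvGroups, PySem.Dict.get?]
  by_cases h3 : c = "alembic upgrade"
  · subst h3; simp [pvKeepA, pvKeepB, pvTable, pvGroups, PySem.Dict.get?]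
  by_cases h4 : c = "alembic downgrade"
  · subst h4; simp [pvKeepA, pvKeepB, pvTable, pvGroups, PySem.Dict.get?]
  by_cases h5 : c = "flyway migrate"
  · subst h5; simp [pvKeepA, pvKeepB, pvTable, pvGroups, PySem.Dict.get?]
  by_cases h6 : c = "docker build"
  · subst h6; simp [pvKeepA, pvKeepB, pvTable, pvGroups, PySem.Dict.get?]
  by_cases h7 : c = "docker push"
  · subst h7; simp [pvKeepA, pvKeepB, pvTable, pvGroups, PySem.Dict.get?]
  · simp [pvKeepA, pvKeepB, pvTable, pvGroups, PySem.Dict.get?,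
      Ne.symm h1, Ne.symm h2, Ne.symm h3, Ne.symm h4, Ne.symm h5, Ne.symm h6, Ne.symm h7,
      h1, h2, h3, h4, h5, h6, h7]

-- ===== VERDICT (by name: the statement is the Claim_ definition above) =====
theorem filter_blocked_commands_spec : Claim_equal_filter_blocked_commands := by
  intro commands deps _
  unfold Spec_filter_blocked_commands filter_blocked_commands filter_blocked_commands_alt
  by_cases h : deps.isEmpty
  · simp [h]
  · simp only [h, Bool.false_eq_true, if_false]
    rw [pv_foldA_eq, pv_foldB_eq]
    simp only [List.nil_append]
    exact List.filter_congr (fun c _ => pv_keep_eq deps c)
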